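-- pv_equiv track=rewrite | github.com/edwinthomas444/diverse-keyphrase-generation | dataset/pipelines.py | _compute_2d_mask_from_1d
-- ===== SOURCE A (Python) =====
-- def _compute_2d_mask_from_1d(oned_mask, max_units, max_unit_length):
--     max_kps, max_seq_len = max_units, max_unit_length
--     decoder_token_attention_mask_2d = []
--     for i in range(max_kps):
--         slice = oned_mask[i*max_seq_len:(i+1)*max_seq_len]
--         # find last non zero index
--         one_pos = [pos for pos, elem in enumerate(slice) if elem != 0]
--         last_one_pos = one_pos[-1] if one_pos else -1
--         if last_one_pos != -1:
--             fill = 1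
--         else:
--             fill = 0
--             last_one_pos = max_seq_len-1
--         for j in range(max_seq_len):
--             row = [0]*max_seq_len*max_kps
--             if j <= last_one_pos:
--                 row = [0]*i*max_seq_len + [fill]*(last_one_pos+1) + [0]*(
--                     max_seq_len*(max_kps-(i+1)) + max_seq_len-(last_one_pos+1))
--             decoder_token_attention_mask_2d.append(row)
--     return decoder_token_attention_mask_2d
-- ===== SOURCE B (Python) =====
-- def _compute_2d_mask_from_1d(oned_mask, max_units, max_unit_length):
--     k, n = max_units, max_unit_length
--     if k <= 0 or n <= 0:
--         return []
--     N = k * n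
--     # single linear pass over the flat mask: record, per block, the offset of
--     # the latest nonzero seen (positions past N are ignored, as A's slicing does)
--     last = [-1] * k
--     for p, v in enumerate(oned_mask):
--         if p >= N:
--             break
--         if v != 0:
--             last[p // n] = p % n
--     # entrywise closed form: cell (r, c) attends iff r and c lie in the same
--     # block and both offsets are at most that block's last nonzero offset
--     return [[1 if (r // n == c // n and r % n <= last[r // n] and c % n <= last[r // n]) else 0
--              for c in range(N)] for r in range(N)]
-- ===== Notes on version B (the rewrite author's own statement) =====
-- stated objective: alternative
-- what changed: Replaces A's per-block slicing and per-row list concatenation by a single linear pass over the flat 1D mask that records each block's last nonzero offset (with early break past k*n), followed by an entrywise closed-form construction: cell (r,c) is 1 iff r and c share a block and both offsets are at most that block's recorded last offset; no slices, no row concatenation, no fill/sentinel reassignment.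
import Mathlib
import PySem

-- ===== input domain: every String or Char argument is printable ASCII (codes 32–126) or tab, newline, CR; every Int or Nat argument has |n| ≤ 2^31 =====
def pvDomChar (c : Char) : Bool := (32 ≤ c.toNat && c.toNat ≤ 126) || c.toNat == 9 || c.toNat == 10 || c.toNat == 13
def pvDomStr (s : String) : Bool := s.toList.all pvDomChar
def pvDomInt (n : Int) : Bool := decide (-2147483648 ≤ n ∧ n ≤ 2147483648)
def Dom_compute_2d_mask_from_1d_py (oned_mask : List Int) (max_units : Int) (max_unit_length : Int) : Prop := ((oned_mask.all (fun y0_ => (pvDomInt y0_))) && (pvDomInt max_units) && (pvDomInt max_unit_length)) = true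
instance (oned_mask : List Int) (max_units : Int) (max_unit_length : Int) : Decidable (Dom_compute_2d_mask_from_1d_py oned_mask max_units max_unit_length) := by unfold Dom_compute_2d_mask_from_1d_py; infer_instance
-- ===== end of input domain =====

-- B replaces A's per-block slicing and per-row concatenation by a single linear
-- pass recording each block's last nonzero offset, then an entrywise closed-form
-- N×N matrix (cell (r,c) = 1 iff same block and both offsets ≤ that offset).


-- ===== PORT A =====
-- Python '([0]*a)*b' (left-assoc list repetition): length max(a,0)*max(b,0), exact
def pyRep2 (a b : Int) : List Int := List.replicate (a.toNat * b.toNat) 0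

def compute_2d_mask_from_1d_py (oned_mask : List Int) (max_units : Int) (max_unit_length : Int) : List (List Int) :=
  let max_kps := max_units
  let max_seq_len := max_unit_length
  (PySem.List.pyRange 0 max_kps 1).foldl (fun acc i =>
    let slc := PySem.List.slice oned_mask (some (i * max_seq_len)) (some ((i + 1) * max_seq_len))
    let one_pos := ((PySem.List.enumerate slc 0).filter (fun pe => pe.2 != 0)).map (fun pe => pe.1)
    -- 'one_pos[-1] if one_pos else -1'
    let last_one_pos := one_pos.getLast?.getD (-1)
    -- the if/else that assigns fill and possibly reassigns last_one_pos, as a pair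
    let fl := if last_one_pos ≠ -1 then ((1 : Int), last_one_pos) else ((0 : Int), max_seq_len - 1)
    (PySem.List.pyRange 0 max_seq_len 1).foldl (fun acc2 j =>
      let row := pyRep2 max_seq_len max_kps
      let row := if j ≤ fl.2 then
          pyRep2 i max_seq_len ++ List.replicate (fl.2 + 1).toNat fl.1 ++
            List.replicate (max_seq_len * (max_kps - (i + 1)) + max_seq_len - (fl.2 + 1)).toNat 0
        else row
      acc2 ++ [row]) acc) []

-- ===== PORT B =====
-- 'for p, v in enumerate(oned_mask): if p >= N: break; if v != 0: last[p//n] = p%n'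
-- — the single linear pass with early break, as structural recursion on the
-- enumerated pairs threading the 'last' array
def lastLoop (n N : Int) : List (Int × Int) → List Int → List Int
  | [], last => last
  | (p, v) :: rest, last =>
    if p ≥ N then last
    else lastLoop n N rest
      (if v ≠ 0 then last.set (PySem.Int.floordiv p n).toNat (PySem.Int.mod p n) else last)

def compute_2d_mask_from_1d_py_alt (oned_mask : List Int) (max_units : Int) (max_unit_length : Int) : List (List Int) :=
  if max_units ≤ 0 ∨ max_unit_length ≤ 0 then []
  else
    let k := max_units
    let n := max_unit_length
    let N := k * n
    let last := lastLoop n N (PySem.List.enumerate oned_mask 0) (List.replicate k.toNat (-1))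
    (PySem.List.pyRange 0 N 1).map (fun r =>
      (PySem.List.pyRange 0 N 1).map (fun c =>
        if PySem.Int.floordiv r n = PySem.Int.floordiv c n ∧
            PySem.Int.mod r n ≤ PySem.List.pyGetD last (PySem.Int.floordiv r n) (-1) ∧
            PySem.Int.mod c n ≤ PySem.List.pyGetD last (PySem.Int.floordiv r n) (-1)
        then (1 : Int) else 0))

-- ===== PRECONDITION & SPEC =====
def Spec_compute_2d_mask_from_1d_py (oned_mask : List Int) (max_units : Int) (max_unit_length : Int) (out : List (List Int)) : Prop := out = compute_2d_mask_from_1d_py_alt oned_mask max_units max_unit_length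
instance (oned_mask : List Int) (max_units : Int) (max_unit_length : Int) (out : List (List Int)) : Decidable (Spec_compute_2d_mask_from_1d_py oned_mask max_units max_unit_length out) := by unfold Spec_compute_2d_mask_from_1d_py; infer_instance

-- ===== CLAIM (what is proved, stated in full; the proofs are below) =====
def Claim_equal_compute_2d_mask_from_1d_py : Prop := ∀ (oned_mask : List Int) (max_units : Int) (max_unit_length : Int), Dom_compute_2d_mask_from_1d_py oned_mask max_units max_unit_length → Spec_compute_2d_mask_from_1d_py oned_mask max_units max_unit_length (compute_2d_mask_from_1d_py oned_mask max_units max_unit_length)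

-- ===== LEMMAS AND PROOFS =====

-- the per-row function A computes for block i, row index j
def Arow (o : List Int) (k n i j : Int) : List Int :=
  let L := ((((PySem.List.enumerate (PySem.List.slice o (some (i * n)) (some ((i + 1) * n))) 0).filter
      (fun pe => pe.2 != 0)).map (fun pe => pe.1)).getLast?.getD (-1))
  let fl := if L ≠ -1 then ((1 : Int), L) else ((0 : Int), n - 1)
  if j ≤ fl.2 then
    pyRep2 i n ++ List.replicate (fl.2 + 1).toNat fl.1 ++
      List.replicate (n * (k - (i + 1)) + n - (fl.2 + 1)).toNat 0
  else pyRep2 n k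

-- the per-row function B computes at absolute row index r
def Brow2 (o : List Int) (k n : Int) (r : Int) : List Int :=
  (PySem.List.pyRange 0 (k * n) 1).map (fun c =>
    if PySem.Int.floordiv r n = PySem.Int.floordiv c n ∧
        PySem.Int.mod r n ≤ PySem.List.pyGetD (lastLoop n (k * n) (PySem.List.enumerate o 0) (List.replicate k.toNat (-1))) (PySem.Int.floordiv r n) (-1) ∧
        PySem.Int.mod c n ≤ PySem.List.pyGetD (lastLoop n (k * n) (PySem.List.enumerate o 0) (List.replicate k.toNat (-1))) (PySem.Int.floordiv r n) (-1)
    then (1 : Int) else 0)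

-- "last nonzero offset so far": left fold over a block's elements, offsets from j
def blockFold : List Int → Int → Int → Int
  | [], _, acc => acc
  | v :: t, j, acc => blockFold t (j + 1) (if v ≠ 0 then j else acc)

theorem A_flat (o : List Int) (k n : Int) :
    compute_2d_mask_from_1d_py o k n
      = (PySem.List.pyRange 0 k 1).flatMap (fun i => (PySem.List.pyRange 0 n 1).map (Arow o k n i)) := by
  unfold compute_2d_mask_from_1d_py Arow
  simp only [PySem.List.foldl_append_singleton_eq_map, PySem.List.foldl_append_eq_flatMap, List.nil_append]

theorem B_rows (o : List Int) (k n : Int) (h : ¬ (k ≤ 0 ∨ n ≤ 0)) :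
    compute_2d_mask_from_1d_py_alt o k n = (PySem.List.pyRange 0 (k * n) 1).map (Brow2 o k n) := by
  unfold compute_2d_mask_from_1d_py_alt Brow2
  rw [if_neg h]

-- A's 'one_pos[-1] if one_pos else -1' is the left fold carrying the last nonzero offset
theorem getLast_filter_eq_blockFold (ys : List Int) : ∀ (a acc : Int),
    ((((PySem.List.enumerate ys a).filter (fun pe => pe.2 != 0)).map
        (fun pe : Int × Int => pe.1)).getLast?.getD acc) = blockFold ys a acc := by
  induction ys with
  | nil => intro a acc; simp [PySem.List.enumerate_nil, blockFold]
  | cons v t ih =>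
    intro a acc
    rw [PySem.List.enumerate_cons, List.filter_cons]
    by_cases hv : v = 0
    · subst hv
      rw [if_neg (by simp), ih]
      simp only [blockFold]
      norm_num
    · rw [if_pos (by simpa using hv), List.map_cons, List.getLast?_cons, Option.getD_some, ih]
      simp only [blockFold]
      rw [if_pos hv]

-- range of blockFold: either the start accumulator or an offset inside the block
theorem blockFold_bounds (ys : List Int) : ∀ (j acc : Int),
    blockFold ys j acc = acc ∨ (j ≤ blockFold ys j acc ∧ blockFold ys j acc < j + ys.length) := by
  induction ys with
  | nil => intro j acc; exact Or.inl rfl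
  | cons v t ih =>
    intro j acc
    simp only [blockFold]
    rcases ih (j + 1) (if v ≠ 0 then j else acc) with h | h
    · rw [h]
      split_ifs with hv
      · right
        simp only [List.length_cons]
        constructor <;> push_cast <;> omega
      · exact Or.inl rfl
    · right
      simp only [List.length_cons]
      constructor <;> push_cast <;> omega

-- once the position counter reaches N the loop never writes again
theorem lastLoop_ge (n N : Int) (xs : List Int) (a : Int) (s : List Int) (ha : N ≤ a) :
    lastLoop n N (PySem.List.enumerate xs a) s = s := by
  cases xs with
  | nil => rw [PySem.List.enumerate_nil]; rfl
  | cons v t =>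
    rw [PySem.List.enumerate_cons]
    simp only [lastLoop]
    rw [if_pos ha]

-- the loop distributes over an append whose first part never triggers the break
theorem lastLoop_append (n N : Int) (ps qs : List (Int × Int)) :
    ∀ s, (∀ pv ∈ ps, pv.1 < N) →
    lastLoop n N (ps ++ qs) s = lastLoop n N qs (lastLoop n N ps s) := by
  induction ps with
  | nil => intro s _; rfl
  | cons pv rest ih =>
    intro s hmem
    obtain ⟨p, v⟩ := pv
    simp only [List.cons_append, lastLoop]
    rw [if_neg (not_le.mpr (hmem (p, v) (by simp))), if_neg (not_le.mpr (hmem (p, v) (by simp)))]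
    exact ih _ (fun x hx => hmem x (List.mem_cons_of_mem _ hx))

-- position i*n+j inside block i has quotient i and remainder j
theorem floordiv_block (n : Int) (hn : 0 < n) (i j : Nat) (hj : j < n.toNat) :
    PySem.Int.floordiv ((i * n.toNat + j : Nat) : Int) n = (i : Int)
      ∧ PySem.Int.mod ((i * n.toNat + j : Nat) : Int) n = (j : Int) := by
  have hnc : ((n.toNat : Nat) : Int) = n := Int.toNat_of_nonneg hn.le
  have h1 : (i * n.toNat + j) / n.toNat = i := by
    rw [Nat.mul_comm i n.toNat, Nat.mul_add_div (by omega), Nat.div_eq_of_lt hj]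
    omega
  have h2 : (i * n.toNat + j) % n.toNat = j := by
    rw [Nat.mul_comm i n.toNat, Nat.mul_add_mod, Nat.mod_eq_of_lt hj]
  have hfd := PySem.Int.floordiv_natCast (i * n.toNat + j) n.toNat
  have hmd := PySem.Int.mod_natCast (i * n.toNat + j) n.toNat
  rw [hnc] at hfd hmd
  rw [h1] at hfd
  rw [h2] at hmd
  exact ⟨hfd, hmd⟩

-- processing one block's pairs folds into a single set of entry i
theorem lastLoop_block (k n : Int) (hk : 0 < k) (hn : 0 < n) (i : Nat) (hik : i < k.toNat)
    (ys : List Int) : ∀ (j : Nat) (s : List Int), i < s.length → j + ys.length ≤ n.toNat →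
    lastLoop n (k * n) (PySem.List.enumerate ys ((i * n.toNat + j : Nat) : Int)) s
      = s.set i (blockFold ys (j : Int) (s.getD i (-1))) := by
  induction ys with
  | nil =>
    intro j s hs _
    rw [PySem.List.enumerate_nil]
    show s = s.set i (blockFold [] (j : Int) (s.getD i (-1)))
    simp only [blockFold]
    rw [List.getD_eq_getElem s (-1) hs, List.set_getElem_self]
  | cons v t ih =>
    intro j s hs hlen
    have hjn : j < n.toNat := by simp only [List.length_cons] at hlen; omega
    have hd := (floordiv_block n hn i j hjn).1
    have hm := (floordiv_block n hn i j hjn).2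
    have hkn2 : (k * n).toNat = k.toNat * n.toNat := Int.toNat_mul hk.le hn.le
    have hplt : ((i * n.toNat + j : Nat) : Int) < k * n := by
      have hle : (i + 1) * n.toNat ≤ k.toNat * n.toNat := Nat.mul_le_mul_right _ (by omega)
      have hsucc : (i + 1) * n.toNat = i * n.toNat + n.toNat := by ring
      have h1 : i * n.toNat + j < k.toNat * n.toNat := by omega
      have h2 : ((k.toNat * n.toNat : Nat) : Int) = k * n := by
        rw [← hkn2]; exact Int.toNat_of_nonneg (by positivity)
      calc ((i * n.toNat + j : Nat) : Int) < ((k.toNat * n.toNat : Nat) : Int) := by exact_mod_cast h1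
        _ = k * n := h2
    rw [PySem.List.enumerate_cons]
    simp only [lastLoop]
    rw [if_neg (not_le.mpr hplt), hd, hm, Int.toNat_natCast]
    have hstep : ((i * n.toNat + j : Nat) : Int) + 1 = ((i * n.toNat + (j + 1) : Nat) : Int) := by
      push_cast; ring
    rw [hstep]
    by_cases hv : v = 0
    · subst hv
      rw [if_neg (by simp)]
      rw [ih (j + 1) s hs (by simp only [List.length_cons] at hlen; omega)]
      congr 1
    · rw [if_pos hv]
      have hs' : i < (s.set i ((j : Nat) : Int)).length := by simpa using hs
      rw [ih (j + 1) _ hs' (by simp only [List.length_cons] at hlen; omega)]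
      have hgd : (s.set i ((j : Nat) : Int)).getD i (-1) = ((j : Nat) : Int) := by
        rw [List.getD_eq_getElem?_getD, List.getElem?_set_self hs, Option.getD_some]
      rw [hgd, List.set_set]
      congr 1
      simp only [blockFold]
      rw [if_pos hv]
      rfl

-- the whole pass, block by block: entry t of the final array is the fold of block t
theorem loop_main (o : List Int) (k n : Int) (hk : 0 < k) (hn : 0 < n) :
    ∀ (d m : Nat) (s : List Int), m + d = k.toNat → s.length = k.toNat →
    ∀ t : Nat, t < k.toNat →
    (lastLoop n (k * n) (PySem.List.enumerate (o.drop (m * n.toNat)) ((m * n.toNat : Nat) : Int)) s).getD t (-1)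
      = if t < m then s.getD t (-1)
        else blockFold ((o.drop (t * n.toNat)).take n.toNat) 0 (s.getD t (-1)) := by
  intro d
  induction d with
  | zero =>
    intro m s hm hs t ht
    have hmk : m = k.toNat := by omega
    have hkn2 : (k * n).toNat = k.toNat * n.toNat := Int.toNat_mul hk.le hn.le
    have hge : k * n ≤ ((m * n.toNat : Nat) : Int) := by
      have h2 : ((k.toNat * n.toNat : Nat) : Int) = k * n := by
        rw [← hkn2]; exact Int.toNat_of_nonneg (by positivity)
      rw [← h2, hmk]
    rw [lastLoop_ge n (k * n) _ _ s hge, if_pos (by omega)]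
  | succ d ihd =>
    intro m s hm hs t ht
    have hmlt : m < k.toNat := by omega
    have hkn2 : (k * n).toNat = k.toNat * n.toNat := Int.toNat_mul hk.le hn.le
    have hdecomp : o.drop (m * n.toNat)
        = (o.drop (m * n.toNat)).take n.toNat ++ o.drop ((m + 1) * n.toNat) := by
      conv_lhs => rw [← List.take_append_drop n.toNat (o.drop (m * n.toNat))]
      rw [List.drop_drop]
      rw [show m * n.toNat + n.toNat = (m + 1) * n.toNat from by ring]
    have hxslen : ((o.drop (m * n.toNat)).take n.toNat).length ≤ n.toNat := by
      simp [List.length_take]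
    have hbound : ∀ pv ∈ PySem.List.enumerate ((o.drop (m * n.toNat)).take n.toNat) ((m * n.toNat : Nat) : Int), pv.1 < k * n := by
      intro pv hpv
      rw [PySem.List.mem_enumerate_iff] at hpv
      obtain ⟨c, hc, rfl⟩ := hpv
      have h1 : m * n.toNat + c < k.toNat * n.toNat := by
        have hle : (m + 1) * n.toNat ≤ k.toNat * n.toNat := Nat.mul_le_mul_right _ (by omega)
        have hsucc : (m + 1) * n.toNat = m * n.toNat + n.toNat := by ring
        omega
      have h2 : ((k.toNat * n.toNat : Nat) : Int) = k * n := by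
        rw [← hkn2]; exact Int.toNat_of_nonneg (by positivity)
      calc ((m * n.toNat : Nat) : Int) + (c : Int) = ((m * n.toNat + c : Nat) : Int) := by push_cast; ring
        _ < ((k.toNat * n.toNat : Nat) : Int) := by exact_mod_cast h1
        _ = k * n := h2
    conv_lhs => rw [hdecomp, PySem.List.enumerate_append]
    rw [lastLoop_append n (k * n) _ _ s hbound]
    have e0 : ((m * n.toNat : Nat) : Int) = ((m * n.toNat + 0 : Nat) : Int) := by norm_num
    rw [e0, lastLoop_block k n hk hn m hmlt _ 0 s (by omega) (by omega)]
    set s1 := s.set m (blockFold ((o.drop (m * n.toNat)).take n.toNat) ((0 : Nat) : Int) (s.getD m (-1))) with hs1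
    have hs1len : s1.length = k.toNat := by rw [hs1, List.length_set, hs]
    have hnext : PySem.List.enumerate (o.drop ((m + 1) * n.toNat)) (((m * n.toNat + 0 : Nat) : Int) + (((o.drop (m * n.toNat)).take n.toNat).length : Int))
        = PySem.List.enumerate (o.drop ((m + 1) * n.toNat)) (((m + 1) * n.toNat : Nat) : Int) := by
      by_cases hfull : ((o.drop (m * n.toNat)).take n.toNat).length = n.toNat
      · rw [hfull]; congr 1; push_cast; ring
      · have hmin : ((o.drop (m * n.toNat)).take n.toNat).length = min n.toNat (o.length - m * n.toNat) := by
          simp [List.length_take]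
        have hsucc : (m + 1) * n.toNat = m * n.toNat + n.toNat := by ring
        have hlt : o.length ≤ (m + 1) * n.toNat := by omega
        rw [List.drop_eq_nil_of_le hlt, PySem.List.enumerate_nil, PySem.List.enumerate_nil]
    rw [hnext, ihd (m + 1) s1 (by omega) hs1len t ht]
    have hset_ne : ∀ t', t' ≠ m → s1.getD t' (-1) = s.getD t' (-1) := by
      intro t' hne
      rw [hs1, List.getD_eq_getElem?_getD, List.getElem?_set_ne (Ne.symm hne), ← List.getD_eq_getElem?_getD]
    by_cases h1 : t < m
    · rw [if_pos (by omega), if_pos h1, hset_ne t (by omega)]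
    · by_cases h2 : t = m
      · subst h2
        rw [if_pos (by omega), if_neg h1, hs1, List.getD_eq_getElem?_getD,
          List.getElem?_set_self (by omega), Option.getD_some, Nat.cast_zero]
      · rw [if_neg (by omega), if_neg h1, hset_ne t h2]

-- indicator of a Nat interval over a range, as three replicate segments
theorem map_ite_interval (N a b : Nat) (hab : a + b ≤ N) (p : Nat → Prop) [DecidablePred p]
    (hp : ∀ c, c < N → (p c ↔ a ≤ c ∧ c < a + b)) :
    (List.range N).map (fun c => if p c then (1 : Int) else 0)
      = List.replicate a 0 ++ List.replicate b 1 ++ List.replicate (N - a - b) 0 := by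
  have hsplit : N = a + b + (N - a - b) := by omega
  conv_lhs => rw [hsplit, List.range_add, List.map_append, List.range_add, List.map_append,
    List.map_map, List.map_map]
  congr 1
  · congr 1
    · rw [List.eq_replicate_iff]
      refine ⟨by simp, ?_⟩
      intro x hx
      simp only [List.mem_map, List.mem_range] at hx
      obtain ⟨c, hc, rfl⟩ := hx
      rw [if_neg]
      rw [hp c (by omega)]
      omega
    · rw [List.eq_replicate_iff]
      refine ⟨by simp, ?_⟩
      intro x hx
      simp only [List.mem_map, List.mem_range, Function.comp_apply] at hx
      obtain ⟨c, hc, rfl⟩ := hx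
      rw [if_pos]
      rw [hp (a + c) (by omega)]
      omega
  · rw [List.eq_replicate_iff]
    refine ⟨by simp, ?_⟩
    intro x hx
    simp only [List.mem_map, List.mem_range, Function.comp_apply] at hx
    obtain ⟨c, hc, rfl⟩ := hx
    rw [if_neg]
    rw [hp (a + b + c) (by omega)]
    omega

-- grouping: range (k*n) as blocks of n consecutive indices
theorem range_mul_flatMap (k n : Nat) :
    List.range (k * n) = (List.range k).flatMap (fun i => (List.range n).map (fun j => i * n + j)) := by
  induction k with
  | zero => simp
  | succ k ih =>
    rw [Nat.succ_mul, List.range_add, ih, List.range_succ, List.flatMap_append]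
    simp [List.flatMap_cons, Nat.add_comm]

-- one row: B's closed-form row at absolute index i*n+j equals A's constructed row
theorem row_eq (o : List Int) (k n : Int) (hk : 0 < k) (hn : 0 < n) (iN jN : Nat)
    (hi : iN < k.toNat) (hj : jN < n.toNat) :
    Brow2 o k n ((iN * n.toNat + jN : Nat) : Int) = Arow o k n (iN : Int) (jN : Int) := by
  have hnc : ((n.toNat : Nat) : Int) = n := Int.toNat_of_nonneg hn.le
  have hkc : ((k.toNat : Nat) : Int) = k := Int.toNat_of_nonneg hk.le
  have hkn2 : (k * n).toNat = k.toNat * n.toNat := Int.toNat_mul hk.le hn.le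
  have hd := (floordiv_block n hn iN jN hj).1
  have hm := (floordiv_block n hn iN jN hj).2
  -- the recorded last offset of block iN
  have hlast : (lastLoop n (k * n) (PySem.List.enumerate o 0) (List.replicate k.toNat (-1))).getD iN (-1)
      = blockFold ((o.drop (iN * n.toNat)).take n.toNat) 0 (-1) := by
    have h := loop_main o k n hk hn k.toNat 0 (List.replicate k.toNat (-1)) (by omega) (by simp) iN hi
    simp only [Nat.zero_mul, List.drop_zero, Nat.cast_zero] at h
    rw [if_neg (by omega)] at h
    rw [h, List.getD_eq_getElem?_getD, List.getElem?_replicate, if_pos hi, Option.getD_some]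
  set L := blockFold ((o.drop (iN * n.toNat)).take n.toNat) 0 (-1) with hLdef
  have hblen : ((o.drop (iN * n.toNat)).take n.toNat).length ≤ n.toNat := by
    simp [List.length_take]
  have hLb : L = -1 ∨ (0 ≤ L ∧ L < n) := by
    rcases blockFold_bounds ((o.drop (iN * n.toNat)).take n.toNat) 0 (-1) with h | h
    · exact Or.inl h
    · right
      refine ⟨h.1, ?_⟩
      have h2 : ((((o.drop (iN * n.toNat)).take n.toNat).length : Nat) : Int) ≤ ((n.toNat : Nat) : Int) := by
        exact_mod_cast hblen
      rw [hnc] at h2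
      have := h.2
      omega
  -- A's L expression is the same fold
  have hslice : PySem.List.slice o (some ((iN : Int) * n)) (some (((iN : Int) + 1) * n))
      = (o.drop (iN * n.toNat)).take n.toNat := by
    rw [PySem.List.slice_toNat o (by positivity) (by positivity)]
    have e1 : ((iN : Int) * n).toNat = iN * n.toNat := by
      rw [Int.toNat_mul (by positivity) hn.le, Int.toNat_natCast]
    have e2 : (((iN : Int) + 1) * n).toNat = (iN + 1) * n.toNat := by
      rw [Int.toNat_mul (by positivity) hn.le, show ((iN : Int) + 1).toNat = iN + 1 from by omega]
    rw [e1, e2]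
    congr 1
    have : (iN + 1) * n.toNat = iN * n.toNat + n.toNat := by ring
    omega
  unfold Brow2 Arow
  rw [hd, hm, PySem.List.pyGetD_natCast, hlast, hslice, getLast_filter_eq_blockFold, ← hLdef]
  simp only []
  have hjInt : ((jN : Nat) : Int) < n := by
    calc ((jN : Nat) : Int) < ((n.toNat : Nat) : Int) := by exact_mod_cast hj
      _ = n := hnc
  have hiInt : ((iN : Nat) : Int) < k := by
    calc ((iN : Nat) : Int) < ((k.toNat : Nat) : Int) := by exact_mod_cast hi
      _ = k := hkc
  -- helper: an all-zero map over the range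
  have hzero : ∀ (P : Int → Prop) [DecidablePred P], (∀ c, ¬ P c) →
      (PySem.List.pyRange 0 (k * n) 1).map (fun c => if P c then (1 : Int) else 0)
        = List.replicate (k.toNat * n.toNat) 0 := by
    intro P _ hP
    rw [List.eq_replicate_iff]
    constructor
    · rw [List.length_map, PySem.List.length_pyRange_one]
      omega
    · intro x hx
      simp only [List.mem_map] at hx
      obtain ⟨c, -, rfl⟩ := hx
      rw [if_neg (hP c)]
  rcases hLb with hL | hL
  · -- empty block: both rows are all zeros
    rw [if_neg (show ¬ (L ≠ -1) from by simp [hL])]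
    simp only []
    rw [if_pos (show ((jN : Nat) : Int) ≤ n - 1 from by omega)]
    rw [hzero _ (by rintro c ⟨-, h2, -⟩; rw [hL] at h2; omega)]
    simp only [pyRep2, Int.toNat_natCast]
    rw [← List.replicate_add, ← List.replicate_add]
    congr 1
    have e3 : (n - 1 + 1).toNat = n.toNat := by omega
    have e4 : (n * (k - ((iN : Int) + 1)) + n - (n - 1 + 1)).toNat = (k * n).toNat - iN * n.toNat - n.toNat := by
      have hr : n * (k - ((iN : Int) + 1)) + n - (n - 1 + 1) = k * n - (iN : Int) * n - n := by ring
      have e5 : ((iN : Int) * n).toNat = iN * n.toNat := by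
        rw [Int.toNat_mul (by positivity) hn.le, Int.toNat_natCast]
      have e6 : (iN : Int) * n ≤ k * n - n := by nlinarith
      have e7 : 0 ≤ (iN : Int) * n := by positivity
      omega
    have e8 : iN * n.toNat + n.toNat ≤ k.toNat * n.toNat := by
      have := Nat.mul_le_mul_right n.toNat (show iN + 1 ≤ k.toNat by omega)
      have hsucc : (iN + 1) * n.toNat = iN * n.toNat + n.toNat := by ring
      omega
    omega
  · -- block with a one
    rw [if_pos (show L ≠ -1 from by omega)]
    simp only []
    by_cases hjle : ((jN : Nat) : Int) ≤ L
    · -- attended row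
      rw [if_pos hjle]
      rw [PySem.List.pyRange_one, List.map_map]
      simp only [Function.comp_def, zero_add, Int.sub_zero, hkn2]
      have hLtn : L.toNat < n.toNat := by omega
      have hab : iN * n.toNat + (L + 1).toNat ≤ k.toNat * n.toNat := by
        have := Nat.mul_le_mul_right n.toNat (show iN + 1 ≤ k.toNat by omega)
        have hsucc : (iN + 1) * n.toNat = iN * n.toNat + n.toNat := by ring
        omega
      rw [map_ite_interval (k.toNat * n.toNat) (iN * n.toNat) (L + 1).toNat hab _ ?_]
      · congr 1
        congr 1
        have hr : n * (k - ((iN : Int) + 1)) + n - (L + 1) = k * n - (iN : Int) * n - (L + 1) := by ring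
        have e5 : ((iN : Int) * n).toNat = iN * n.toNat := by
          rw [Int.toNat_mul (by positivity) hn.le, Int.toNat_natCast]
        have e6 : (iN : Int) * n ≤ k * n - n := by nlinarith
        have e8 : iN * n.toNat + n.toNat ≤ k.toNat * n.toNat := by
          have := Nat.mul_le_mul_right n.toNat (show iN + 1 ≤ k.toNat by omega)
          have hsucc : (iN + 1) * n.toNat = iN * n.toNat + n.toNat := by ring
          omega
        have e7 : 0 ≤ (iN : Int) * n := by positivity
        rw [hr]
        omega
      · -- the cell condition is exactly the interval [iN*n, iN*n + L]
        intro c hc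
        have hfc := PySem.Int.floordiv_natCast c n.toNat
        have hmc := PySem.Int.mod_natCast c n.toNat
        rw [hnc] at hfc hmc
        rw [hfc, hmc]
        have hdm := Nat.div_add_mod c n.toNat
        have hcomm : n.toNat * (c / n.toNat) = (c / n.toNat) * n.toNat := Nat.mul_comm _ _
        have hL1 : (L + 1).toNat = L.toNat + 1 := by omega
        have hLc : ((L.toNat : Nat) : Int) = L := Int.toNat_of_nonneg hL.1
        constructor
        · rintro ⟨h1, -, h3⟩
          have h1' : c / n.toNat = iN := by exact_mod_cast h1.symm
          have h3' : c % n.toNat ≤ L.toNat := by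
            rw [← hLc] at h3
            exact_mod_cast h3
          rw [h1'] at hdm
          have hcomm2 : n.toNat * iN = iN * n.toNat := Nat.mul_comm _ _
          constructor <;> omega
        · rintro ⟨h1, h2⟩
          have hdiv : c / n.toNat = iN := by
            refine Nat.div_eq_of_lt_le h1 ?_
            have hsucc : (iN + 1) * n.toNat = iN * n.toNat + n.toNat := by ring
            omega
          refine ⟨by exact_mod_cast hdiv.symm, hjle, ?_⟩
          rw [hdiv] at hdm
          have hcomm2 : n.toNat * iN = iN * n.toNat := Nat.mul_comm _ _
          have hmle : c % n.toNat ≤ L.toNat := by omega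
          calc ((c % n.toNat : Nat) : Int) ≤ ((L.toNat : Nat) : Int) := by exact_mod_cast hmle
            _ = L := hLc
    · -- row below the block's rows but past the last one: all zeros
      rw [if_neg hjle]
      rw [hzero _ (by rintro c ⟨-, h2, -⟩; exact hjle h2)]
      simp only [pyRep2]
      rw [Nat.mul_comm]

theorem main_eq (o : List Int) (k n : Int) :
    compute_2d_mask_from_1d_py o k n = compute_2d_mask_from_1d_py_alt o k n := by
  by_cases hk : k ≤ 0
  · rw [A_flat, PySem.List.pyRange_one_eq_nil hk]
    unfold compute_2d_mask_from_1d_py_alt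
    rw [if_pos (Or.inl hk)]
    rfl
  · by_cases hn : n ≤ 0
    · rw [A_flat]
      unfold compute_2d_mask_from_1d_py_alt
      rw [if_pos (Or.inr hn)]
      rw [List.flatMap_eq_nil_iff.mpr]
      intro i _
      rw [PySem.List.pyRange_one_eq_nil hn, List.map_nil]
    · have hk' : 0 < k := by omega
      have hn' : 0 < n := by omega
      have hkn2 : (k * n).toNat = k.toNat * n.toNat := Int.toNat_mul hk'.le hn'.le
      rw [A_flat, B_rows o k n (by omega)]
      rw [PySem.List.pyRange_one 0 (k * n), List.map_map]
      simp only [Int.sub_zero, hkn2]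
      rw [range_mul_flatMap, List.map_flatMap]
      rw [PySem.List.pyRange_one 0 k, List.flatMap_map]
      simp only [Int.sub_zero]
      refine List.flatMap_congr ?_
      intro iN hiN
      rw [List.mem_range] at hiN
      rw [List.map_map, PySem.List.pyRange_one 0 n, List.map_map]
      simp only [Int.sub_zero]
      refine List.map_congr_left ?_
      intro jN hjN
      rw [List.mem_range] at hjN
      simp only [Function.comp_apply, zero_add]
      exact (row_eq o k n hk' hn' iN jN hiN hjN).symm

-- ===== VERDICT (by name: the statement is the Claim_ definition above) =====
theorem compute_2d_mask_from_1d_py_spec : Claim_equal_compute_2d_mask_from_1d_py := by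
  intro o k n _
  exact main_eq o k n
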